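-- pv_equiv track=rewrite | github.com/ganondorofu/portableClipboard | Raspberry/code.py | convert_for_japanese_keyboard_smart
-- ===== SOURCE A (Python) =====
-- def find_brace_commands(text):
--     """Manually search for {command} patterns"""
--     matches = []
--     i = 0
--     while i < len(text):
--         start = text.find('{', i)
--         if start == -1:
--             break
--         end = text.find('}', start)
--         if end == -1:
--             break
--         command = text[start+1:end]
--         matches.append((start, end+1, command))
--         i = end + 1
--     return matches
--
-- def convert_for_japanese_keyboard_smart(text):
--     """Symbol conversion while protecting function keys"""
--     commands = find_brace_commands(text)
--     result = ""
--     last_end = 0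
--
--     for start, end, command in commands:
--         # Add text before command
--         if start > last_end:
--             result += text[last_end:start]
--
--         # Always preserve commands (valid or invalid)
--         result += '{' + command + '}'
--         last_end = end
--
--     # Add remaining text
--     if last_end < len(text):
--         result += text[last_end:]
--
--     return result
-- ===== SOURCE B (Python) =====
-- def convert_for_japanese_keyboard_smart(text):
--     """Symbol conversion while protecting function keys: single left-to-right
--     pass that emits each terminated {command} as one protected piece and every
--     other character as-is (no match list, no splice pointer)."""
--     pieces = []
--     rest = text
--     while rest:
--         head, tail = rest[0], rest[1:]
--         if head == '{' and '}' in tail: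
--             body, _, rest = tail.partition('}')
--             pieces.append('{' + body + '}')
--         else:
--             pieces.append(head)
--             rest = tail
--     return ''.join(pieces)
-- ===== Notes on version B (the rewrite author's own statement) =====
-- stated objective: simpler
-- what changed: A first collects a list of (start,end,command) matches with repeated str.find and then splices the string back together with a last_end pointer; B is a single left-to-right pass that emits each terminated {command} group (via partition) or the current character directly, keeping no match list and no splice pointer.
import Mathlib
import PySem

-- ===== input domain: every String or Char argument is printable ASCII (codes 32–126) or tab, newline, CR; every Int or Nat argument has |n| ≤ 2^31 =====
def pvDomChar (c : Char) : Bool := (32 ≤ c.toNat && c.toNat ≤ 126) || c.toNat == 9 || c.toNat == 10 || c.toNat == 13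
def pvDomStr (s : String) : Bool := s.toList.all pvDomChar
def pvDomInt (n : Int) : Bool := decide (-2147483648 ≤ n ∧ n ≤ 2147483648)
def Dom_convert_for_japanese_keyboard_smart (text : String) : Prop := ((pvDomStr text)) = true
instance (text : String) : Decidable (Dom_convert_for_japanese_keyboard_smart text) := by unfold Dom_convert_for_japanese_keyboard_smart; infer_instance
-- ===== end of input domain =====

-- B replaces A's two-phase match-list-then-splice reconstruction by a single left-to-right
-- pass emitting pieces directly (objective: simpler; both return the input text unchanged).

-- ===== PORT A =====
-- Facts about the two str.find results of one iteration of find_brace_commands's while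
-- loop; the port cites this lemma for termination (decreasing_by), the proofs reuse it.
lemma pvFind_facts (cs : List Char) (i : Nat) (hi : i < cs.length)
    (hs : PySem.Chars.findFrom cs ['{'] (i : Int) none ≠ -1)
    (he : PySem.Chars.findFrom cs ['}'] (PySem.Chars.findFrom cs ['{'] (i : Int) none) none ≠ -1) :
    ∃ s e : Nat,
      PySem.Chars.findFrom cs ['{'] (i : Int) none = (s : Int) ∧
      PySem.Chars.findFrom cs ['}'] ((s : Int)) none = (e : Int) ∧
      i ≤ s ∧ s < e ∧ e < cs.length ∧ cs[s]? = some '{' ∧ cs[e]? = some '}' := by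
  obtain ⟨h1, h2, -⟩ := PySem.Chars.findFrom_natCast_spec cs ['{'] i hi.le hs
  set f := PySem.Chars.findFrom cs ['{'] (i : Int) none with hfdef
  have hf0 : (0 : Int) ≤ f := le_trans (Int.natCast_nonneg i) h1
  have hseq : f = ((f.toNat : Nat) : Int) := (Int.toNat_of_nonneg hf0).symm
  have hslen : f.toNat < cs.length := by
    have hl := h2.length_le
    simp only [List.length_singleton, List.length_drop] at hl
    omega
  have hie : i ≤ f.toNat := by
    rw [hseq] at h1; exact_mod_cast h1
  have hcs : cs[f.toNat]? = some '{' := by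
    have hg := h2.getElem (i := 0) (by simp)
    rw [List.getElem_drop] at hg
    simp only [List.getElem_cons_zero, Nat.add_zero] at hg
    exact (List.getElem?_eq_getElem hslen).trans (by rw [← hg])
  rw [hseq] at he
  obtain ⟨h3, h4, -⟩ := PySem.Chars.findFrom_natCast_spec cs ['}'] f.toNat hslen.le he
  set g := PySem.Chars.findFrom cs ['}'] ((f.toNat : Nat) : Int) none with hgdef
  have hg0 : (0 : Int) ≤ g := le_trans (Int.natCast_nonneg _) h3
  have hgeq : g = ((g.toNat : Nat) : Int) := (Int.toNat_of_nonneg hg0).symm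
  have hglen : g.toNat < cs.length := by
    have hl := h4.length_le
    simp only [List.length_singleton, List.length_drop] at hl
    omega
  have hce : cs[g.toNat]? = some '}' := by
    have hg' := h4.getElem (i := 0) (by simp)
    rw [List.getElem_drop] at hg'
    simp only [List.getElem_cons_zero, Nat.add_zero] at hg'
    exact (List.getElem?_eq_getElem hglen).trans (by rw [← hg'])
  have hse : f.toNat ≤ g.toNat := by
    rw [hgeq] at h3; exact_mod_cast h3
  have hne : f.toNat ≠ g.toNat := by
    intro hEq
    rw [hEq, hce] at hcs
    simp at hcs
  exact ⟨f.toNat, g.toNat, hseq, hgeq, hie, lt_of_le_of_ne hse hne, hglen, hcs, hce⟩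

-- port of find_brace_commands: the while loop becomes recursion on the loop index i
def pvFindBrace (cs : List Char) (i : Nat) : List (Nat × Nat × List Char) :=
  if hi : i < cs.length then
    if hs : PySem.Chars.findFrom cs ['{'] (i : Int) none = -1 then []
    else
      if he : PySem.Chars.findFrom cs ['}'] (PySem.Chars.findFrom cs ['{'] (i : Int) none) none = -1 then []
      else
        ((PySem.Chars.findFrom cs ['{'] (i : Int) none).toNat,
         (PySem.Chars.findFrom cs ['}'] (PySem.Chars.findFrom cs ['{'] (i : Int) none) none).toNat + 1,
         PySem.List.slice cs (some (PySem.Chars.findFrom cs ['{'] (i : Int) none + 1))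
           (some (PySem.Chars.findFrom cs ['}'] (PySem.Chars.findFrom cs ['{'] (i : Int) none) none)))
        :: pvFindBrace cs ((PySem.Chars.findFrom cs ['}'] (PySem.Chars.findFrom cs ['{'] (i : Int) none) none).toNat + 1)
  else []
termination_by cs.length - i
decreasing_by
  obtain ⟨s, e, hseq, heeq, his, hse, helt, -, -⟩ := pvFind_facts cs i hi hs he
  rw [hseq, heeq]
  simp only [Int.toNat_natCast]
  omega

-- the body of convert's for-loop (state: (result, last_end))
def pvStep (cs : List Char) (acc : List Char × Nat) (m : Nat × Nat × List Char) : List Char × Nat :=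
  ((if acc.2 < m.1 then acc.1 ++ PySem.List.slice cs (some (acc.2 : Int)) (some (m.1 : Int)) else acc.1)
     ++ ('{' :: (m.2.2 ++ ['}'])), m.2.1)

def convert_for_japanese_keyboard_smart (text : String) : String :=
  let cs := text.toList
  let r := (pvFindBrace cs 0).foldl (pvStep cs) ([], 0)
  String.ofList (if r.2 < cs.length then r.1 ++ PySem.List.slice cs (some ((r.2 : Int))) none else r.1)

-- ===== PORT B =====
-- single pass: emit each terminated '{…}' group (partition) or the current character
def pvPieces (cs : List Char) : List (List Char) :=
  match cs with
  | [] => []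
  | c :: tail =>
    if c = '{' ∧ PySem.Chars.isIn ['}'] tail then
      ('{' :: (tail.takeWhile (fun ch => ch ≠ '}') ++ ['}']))
        :: pvPieces ((tail.dropWhile (fun ch => ch ≠ '}')).drop 1)
    else [c] :: pvPieces tail
termination_by cs.length
decreasing_by
  · have := List.length_dropWhile_le (fun ch => decide (ch ≠ '}')) tail
    simp only [List.length_drop, List.length_cons]
    omega
  · simp

def convert_for_japanese_keyboard_smart_alt (text : String) : String :=
  String.ofList (pvPieces text.toList).flatten  -- ''.join(pieces)

-- ===== PRECONDITION & SPEC =====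
def Spec_convert_for_japanese_keyboard_smart (text : String) (out : String) : Prop := out = convert_for_japanese_keyboard_smart_alt text
instance (text : String) (out : String) : Decidable (Spec_convert_for_japanese_keyboard_smart text out) := by unfold Spec_convert_for_japanese_keyboard_smart; infer_instance

-- ===== CLAIM (what is proved, stated in full; the proofs are below) =====
def Claim_equal_convert_for_japanese_keyboard_smart : Prop := ∀ (text : String), Dom_convert_for_japanese_keyboard_smart text → Spec_convert_for_japanese_keyboard_smart text (convert_for_japanese_keyboard_smart text)

-- ===== LEMMAS AND PROOFS =====

-- the tail append after convert's loop
def pvFinish (cs : List Char) (r : List Char × Nat) : List Char :=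
  if r.2 < cs.length then r.1 ++ PySem.List.slice cs (some ((r.2 : Int))) none else r.1

lemma pv_take_mid (cs : List Char) (a b : Nat) (hab : a < b)
    (hca : cs[a]? = some '{') (hcb : cs[b]? = some '}') :
    cs.take a ++ ('{' :: ((cs.drop (a + 1)).take (b - (a + 1)) ++ ['}'])) = cs.take (b + 1) := by
  obtain ⟨hb, hcb'⟩ := List.getElem?_eq_some_iff.mp hcb
  obtain ⟨ha, hca'⟩ := List.getElem?_eq_some_iff.mp hca
  have e1 : b + 1 = a + (b + 1 - a) := by omega
  rw [e1, List.take_add]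
  congr 1
  have hd : cs.drop a = cs[a] :: cs.drop (a + 1) := List.drop_eq_getElem_cons ha
  rw [hd, hca']
  have e2 : b + 1 - a = (b - a) + 1 := by omega
  rw [e2, List.take_succ_cons]
  congr 1
  have e3 : b - a = (b - (a + 1)) + 1 := by omega
  rw [e3, List.take_add_one]
  congr 1
  rw [List.getElem?_drop]
  have e4 : a + 1 + (b - (a + 1)) = b := by omega
  rw [e4, hcb]
  rfl

lemma pvLoopA (cs : List Char) : ∀ (n i : Nat), i ≤ cs.length → cs.length - i ≤ n →
    pvFinish cs ((pvFindBrace cs i).foldl (pvStep cs) (cs.take i, i)) = cs := by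
  intro n
  induction n with
  | zero =>
    intro i hi hn
    have hieq : i = cs.length := by omega
    have hfb : pvFindBrace cs i = [] := by
      rw [pvFindBrace]; simp [hieq]
    rw [hfb]
    simp [pvFinish, hieq]
  | succ n IH =>
    intro i hi hn
    by_cases hlt : i < cs.length
    · by_cases hs : PySem.Chars.findFrom cs ['{'] (i : Int) none = -1
      · have hfb : pvFindBrace cs i = [] := by
          rw [pvFindBrace]; simp [hlt, hs]
        rw [hfb]
        simp [pvFinish, hlt, PySem.List.slice_from_natCast]
      · by_cases he : PySem.Chars.findFrom cs ['}'] (PySem.Chars.findFrom cs ['{'] (i : Int) none) none = -1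
        · have hfb : pvFindBrace cs i = [] := by
            rw [pvFindBrace]; simp [hlt, hs, he]
          rw [hfb]
          simp [pvFinish, hlt, PySem.List.slice_from_natCast]
        · obtain ⟨s, e, hseq, heeq, his, hse, helt, hcs, hce⟩ := pvFind_facts cs i hlt hs he
          have hcast : ((s : Int) + 1) = (((s + 1 : Nat)) : Int) := by push_cast; ring
          have hfb : pvFindBrace cs i
              = (s, e + 1, (cs.drop (s + 1)).take (e - (s + 1))) :: pvFindBrace cs (e + 1) := by
            rw [pvFindBrace, dif_pos hlt, dif_neg hs, dif_neg he, hseq, heeq]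
            rw [hcast, PySem.List.slice_natCast]
            simp [Int.toNat_natCast]
          rw [hfb, List.foldl_cons]
          have hinit : (if i < s then cs.take i ++ PySem.List.slice cs (some (i : Int)) (some (s : Int)) else cs.take i) = cs.take s := by
            by_cases hio : i < s
            · rw [if_pos hio, PySem.List.slice_natCast]
              rw [← List.take_add]
              congr 1
              omega
            · rw [if_neg hio]
              have h' : i = s := by omega
              rw [h']
          have hstep : pvStep cs (cs.take i, i) (s, e + 1, (cs.drop (s + 1)).take (e - (s + 1)))
              = (cs.take (e + 1), e + 1) := by
            unfold pvStep
            simp only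
            rw [hinit, pv_take_mid cs s e hse hcs hce]
          rw [hstep]
          exact IH (e + 1) (by omega) (by omega)
    · have hieq : i = cs.length := by omega
      have hfb : pvFindBrace cs i = [] := by
        rw [pvFindBrace]; simp [hieq]
      rw [hfb]
      simp [pvFinish, hieq]

lemma pvPieces_flatten (cs : List Char) : (pvPieces cs).flatten = cs := by
  induction cs using pvPieces.induct with
  | case1 => simp [pvPieces]
  | case2 c tail h IH =>
    obtain ⟨hc, hin⟩ := h
    subst hc
    rw [pvPieces]
    rw [if_pos ⟨rfl, hin⟩]
    simp only [List.flatten_cons, IH]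
    have hmem : '}' ∈ tail :=
      ((PySem.Chars.isIn_iff_infix ['}'] tail).1 hin).subset (by simp)
    have hdw : tail.dropWhile (fun ch => ch ≠ '}') ≠ [] := by
      intro h0
      rw [List.dropWhile_eq_nil_iff] at h0
      have := h0 '}' hmem
      simp at this
    have h2 : '}' :: (tail.dropWhile (fun ch => ch ≠ '}')).tail = tail.dropWhile (fun ch => ch ≠ '}') := by
      obtain ⟨x, xs, hx⟩ := List.exists_cons_of_ne_nil hdw
      have hx' : x = '}' := by
        have hh := List.head_dropWhile_not (fun ch => decide (ch ≠ '}')) hdw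
        simp only [hx, List.head_cons] at hh
        simpa using hh
      rw [hx]
      simp [hx']
    simp only [List.cons_append, List.append_assoc, List.nil_append, List.drop_one]
    rw [h2, List.takeWhile_append_dropWhile]
  | case3 c tail h IH =>
    rw [pvPieces, if_neg h]
    simp [IH]

-- ===== VERDICT (by name: the statement is the Claim_ definition above) =====
theorem convert_for_japanese_keyboard_smart_spec : Claim_equal_convert_for_japanese_keyboard_smart := by
  intro text _
  unfold Spec_convert_for_japanese_keyboard_smart
  show String.ofList (pvFinish text.toList ((pvFindBrace text.toList 0).foldl (pvStep text.toList) ([], 0)))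
      = String.ofList (pvPieces text.toList).flatten
  have hA : pvFinish text.toList ((pvFindBrace text.toList 0).foldl (pvStep text.toList) (text.toList.take 0, 0)) = text.toList :=
    pvLoopA text.toList text.toList.length 0 (Nat.zero_le _) (by omega)
  rw [pvPieces_flatten]
  have hA' : pvFinish text.toList ((pvFindBrace text.toList 0).foldl (pvStep text.toList) ([], 0)) = text.toList := by
    simpa using hA
  exact congrArg String.ofList hA'
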